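-- pv_equiv track=rewrite | github.com/prerakpatelca/Multinomial-Naive-Bayes-classification-algorithm | Assignment3B.py | setOfWords
-- ===== SOURCE A (Python) =====
-- def setOfWords(vocabList, inputList):
--     """ vocabList is a set of words (as a list). inputList is a list of words
--     occurring in a document. Returns a list of 1's and 0's to indicate
--     the presence or absence of each word in vocabList"""
--     d = {}
--     for word in inputList:
--         d[word] = 1
--     setofwords = []
--     for word in vocabList:
--         setofwords.append(d.get(word,0))
--     return setofwords
-- ===== SOURCE B (Python) =====
-- def setOfWords(vocabList, inputList):
--     """ vocabList is a set of words (as a list). inputList is a list of words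
--     occurring in a document. Returns a list of 1's and 0's to indicate
--     the presence or absence of each word in vocabList"""
--     index = {}
--     for i, word in enumerate(vocabList):
--         index.setdefault(word, []).append(i)
--     result = [0] * len(vocabList)
--     for word in dict.fromkeys(inputList):
--         for i in index.get(word, ()):
--             result[i] = 1
--     return result
-- ===== Notes on version B (the rewrite author's own statement) =====
-- stated objective: alternative
-- what changed: B inverts the control flow: instead of marking document words in a dict and then scanning the vocabulary, B builds a word-to-positions index of the vocabulary once, starts from a zero vector, and drives the loop from the document side, setting the recorded positions to 1.
import Mathlib
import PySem

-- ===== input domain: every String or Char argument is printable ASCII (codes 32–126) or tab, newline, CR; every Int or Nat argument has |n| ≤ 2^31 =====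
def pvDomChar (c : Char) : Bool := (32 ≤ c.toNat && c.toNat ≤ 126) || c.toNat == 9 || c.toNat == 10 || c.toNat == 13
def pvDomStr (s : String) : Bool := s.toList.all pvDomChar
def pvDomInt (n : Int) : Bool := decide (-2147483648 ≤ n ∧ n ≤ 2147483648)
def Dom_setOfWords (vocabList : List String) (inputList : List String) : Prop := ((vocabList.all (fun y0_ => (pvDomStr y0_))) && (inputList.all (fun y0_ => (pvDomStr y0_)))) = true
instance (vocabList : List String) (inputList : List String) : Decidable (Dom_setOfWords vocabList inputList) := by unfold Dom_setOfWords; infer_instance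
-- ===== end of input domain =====

-- B inverts the control flow: it indexes the vocabulary by word positions once and drives the
-- loop from the document side over a mutable zero vector (objective: alternative, same cost).

-- ===== PORT A =====
def setOfWords (vocabList : List String) (inputList : List String) : List Int :=
  let d := inputList.foldl (fun d w => d.insert w (1 : Int)) PySem.Dict.empty
  vocabList.foldl (fun acc w => acc ++ [d.getD w 0]) []

-- ===== PORT B =====
-- 'for i, word in enumerate(vocabList): index.setdefault(word, []).append(i)' as structural
-- recursion carrying the enumerate counter i (always ≥ 0 in Python, hence Nat is exact).
def buildIdx : List String → Nat → PySem.Dict String (List Nat) → PySem.Dict String (List Nat)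
  | [], _, d => d
  | w :: ws, i, d => buildIdx ws (i + 1) (d.insert w (d.getD w [] ++ [i]))

-- 'for i in ps: result[i] = 1' (every recorded i is a valid index, so List.set is exact)
def setList1 : List Nat → List Int → List Int
  | [], r => r
  | i :: is, r => setList1 is (r.set i 1)

def setOfWords_alt (vocabList : List String) (inputList : List String) : List Int :=
  let idx := buildIdx vocabList 0 PySem.Dict.empty
  (PySem.List.dedup inputList).foldl (fun res w =>
    match idx.get? w with
    | some ps => setList1 ps res
    | none => res) (List.replicate vocabList.length (0 : Int))

-- ===== PRECONDITION & SPEC =====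
def Spec_setOfWords (vocabList : List String) (inputList : List String) (out : List Int) : Prop := out = setOfWords_alt vocabList inputList
instance (vocabList : List String) (inputList : List String) (out : List Int) : Decidable (Spec_setOfWords vocabList inputList out) := by unfold Spec_setOfWords; infer_instance

-- ===== CLAIM (what is proved, stated in full; the proofs are below) =====
def Claim_equal_setOfWords : Prop := ∀ (vocabList : List String) (inputList : List String), Dom_setOfWords vocabList inputList → Spec_setOfWords vocabList inputList (setOfWords vocabList inputList)

-- ===== LEMMAS AND PROOFS =====

-- positions (counting from k) at which w occurs in a list
def posOf (w : String) : List String → Nat → List Nat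
  | [], _ => []
  | v :: vs, k => (if v = w then [k] else []) ++ posOf w vs (k + 1)

-- ---- A side ----

theorem foldl_append_map (f : String → Int) :
    ∀ (L : List String) (acc : List Int),
      L.foldl (fun a w => a ++ [f w]) acc = acc ++ L.map f := by
  intro L
  induction L with
  | nil => simp
  | cons w L ih => intro acc; simp [List.foldl, ih]

theorem getD_fold_insert :
    ∀ (L : List String) (d : PySem.Dict String Int) (w : String),
      (L.foldl (fun d w => d.insert w (1 : Int)) d).getD w 0
        = if w ∈ L then 1 else d.getD w 0 := by
  intro L
  induction L with
  | nil => simp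
  | cons v L ih =>
    intro d w
    simp only [List.foldl, ih, List.mem_cons]
    rw [PySem.Dict.getD_insert]
    by_cases hw : w ∈ L
    · simp [hw]
    · by_cases hv : w = v
      · simp [hv]
      · simp [hw, hv]

theorem setOfWords_eq_map (vocabList inputList : List String) :
    setOfWords vocabList inputList
      = vocabList.map (fun v => if v ∈ inputList then (1 : Int) else 0) := by
  unfold setOfWords
  rw [foldl_append_map]
  simp only [List.nil_append]
  apply List.map_congr_left
  intro v _
  rw [getD_fold_insert]
  simp [PySem.Dict.getD]

-- ---- B side ----

theorem buildIdx_getD :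
    ∀ (vs : List String) (k : Nat) (d : PySem.Dict String (List Nat)) (w : String),
      (buildIdx vs k d).getD w [] = d.getD w [] ++ posOf w vs k := by
  intro vs
  induction vs with
  | nil => simp [buildIdx, posOf]
  | cons v vs ih =>
    intro k d w
    simp only [buildIdx, posOf, ih]
    rw [PySem.Dict.getD_insert]
    by_cases hv : v = w
    · simp [hv]
    · have hv' : ¬ w = v := fun h => hv h.symm
      simp [hv, hv']

theorem buildIdx_get?_none :
    ∀ (vs : List String) (k : Nat) (d : PySem.Dict String (List Nat)) (w : String),
      (buildIdx vs k d).get? w = none ↔ d.get? w = none ∧ w ∉ vs := by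
  intro vs
  induction vs with
  | nil => simp [buildIdx]
  | cons v vs ih =>
    intro k d w
    simp only [buildIdx, ih, List.mem_cons]
    rw [PySem.Dict.get?_insert]
    by_cases hv : w = v
    · simp [hv]
    · simp only [hv, if_false]
      tauto

theorem mem_posOf :
    ∀ (vs : List String) (k j : Nat) (w : String),
      j ∈ posOf w vs k ↔ k ≤ j ∧ vs[j - k]? = some w := by
  intro vs
  induction vs with
  | nil => simp [posOf]
  | cons v vs ih =>
    intro k j w
    simp only [posOf, List.mem_append, ih]
    constructor
    · rintro (h | ⟨h1, h2⟩)
      · have hv : v = w ∧ j = k := by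
          by_cases hvw : v = w <;> simp [hvw] at h <;> exact ⟨hvw, h⟩
        refine ⟨hv.2.ge, ?_⟩
        simp [hv.2, hv.1]
      · refine ⟨by omega, ?_⟩
        have : j - k = (j - (k + 1)) + 1 := by omega
        rw [this]; simpa using h2
    · rintro ⟨h1, h2⟩
      by_cases hj : j = k
      · subst hj
        simp at h2
        left; simp [h2]
      · right
        refine ⟨by omega, ?_⟩
        have : j - k = (j - (k + 1)) + 1 := by omega
        rw [this] at h2; simpa using h2

theorem setList1_getElem? :
    ∀ (ps : List Nat) (r : List Int) (j : Nat),
      (setList1 ps r)[j]? = if j ∈ ps ∧ j < r.length then some 1 else r[j]? := by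
  intro ps
  induction ps with
  | nil => simp [setList1]
  | cons i ps ih =>
    intro r j
    simp only [setList1, ih, List.length_set, List.mem_cons]
    rw [List.getElem?_set]
    by_cases hj : j ∈ ps
    · by_cases hlen : j < r.length
      · simp [hj, hlen]
      · by_cases hij : i = j <;> simp [hj, hlen, hij]
    · by_cases hij : i = j
      · subst hij
        by_cases hlen : i < r.length <;> simp [hj, hlen]
      · have hji : ¬ (j = i) := fun h => hij h.symm
        simp [hj, hij, hji]

-- one document word applied to a map-shaped vector
theorem step_lemma (vocab : List String) (q : String → Bool) (w : String) :
    (match (buildIdx vocab 0 PySem.Dict.empty).get? w with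
      | some ps => setList1 ps (vocab.map (fun v => if q v then (1 : Int) else 0))
      | none => vocab.map (fun v => if q v then (1 : Int) else 0))
    = vocab.map (fun v => if (q v || v == w) then (1 : Int) else 0) := by
  rcases hget : (buildIdx vocab 0 PySem.Dict.empty).get? w with _ | ps
  · have hnm : w ∉ vocab := ((buildIdx_get?_none vocab 0 _ w).mp hget).2
    simp only
    apply List.map_congr_left
    intro v hv
    have : v ≠ w := fun h => hnm (h ▸ hv)
    simp [this]
  · have hps : ps = posOf w vocab 0 := by
      have := buildIdx_getD vocab 0 PySem.Dict.empty w
      simp only [PySem.Dict.getD, hget] at this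
      simpa using this
    simp only
    apply List.ext_getElem?
    intro j
    rw [setList1_getElem?, List.getElem?_map, List.getElem?_map, List.length_map]
    by_cases hjl : j < vocab.length
    · have hmem : j ∈ ps ↔ vocab[j]? = some w := by
        rw [hps, mem_posOf]; simp
      rcases hv : vocab[j]? with _ | v
      · rw [List.getElem?_eq_none_iff] at hv
        omega
      · by_cases hvw : v = w
        · have : j ∈ ps := hmem.mpr (by rw [hv, hvw])
          simp [this, hjl, hvw]
        · have : j ∉ ps := fun h => hvw (by have := hmem.mp h; rw [hv] at this; simpa using this)
          simp [this, hvw]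
    · have : vocab[j]? = none := List.getElem?_eq_none_iff.mpr (by omega)
      simp [hjl]

theorem fold_invariant (vocab : List String) :
    ∀ (L : List String) (q : String → Bool),
      L.foldl (fun res w =>
          match (buildIdx vocab 0 PySem.Dict.empty).get? w with
          | some ps => setList1 ps res
          | none => res) (vocab.map (fun v => if q v then (1 : Int) else 0))
      = vocab.map (fun v => if (q v || decide (v ∈ L)) then (1 : Int) else 0) := by
  intro L
  induction L with
  | nil => simp
  | cons w L ih =>
    intro q
    simp only [List.foldl]
    rw [step_lemma vocab q w, ih]
    apply List.map_congr_left
    intro v _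
    have : ((q v || v == w) || decide (v ∈ L)) = (q v || decide (v ∈ w :: L)) := by
      simp only [List.mem_cons]
      rcases hq : q v <;> rcases hm : decide (v ∈ L) <;> simp_all <;> by_cases h : v = w <;> simp [h]
    rw [this]

theorem setOfWords_alt_eq_map (vocabList inputList : List String) :
    setOfWords_alt vocabList inputList
      = vocabList.map (fun v => if v ∈ inputList then (1 : Int) else 0) := by
  unfold setOfWords_alt
  have hrep : List.replicate vocabList.length (0 : Int)
      = vocabList.map (fun v => if (fun _ : String => false) v then (1 : Int) else 0) := by
    simp [List.map_const']
  simp only [hrep]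
  rw [fold_invariant vocabList (PySem.List.dedup inputList) (fun _ => false)]
  simp [PySem.List.mem_dedup]

-- ===== VERDICT (by name: the statement is the Claim_ definition above) =====
theorem setOfWords_spec : Claim_equal_setOfWords := by
  intro vocabList inputList _
  unfold Spec_setOfWords
  rw [setOfWords_eq_map, setOfWords_alt_eq_map]
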